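-- pv_equiv track=rewrite | github.com/heyyytamvo/Codeforces | Lec01-DynamicArray/NightAtMuseum.py | goClockWise
-- ===== SOURCE A (Python) =====
-- def FindIndex(array, c_ASCII):
--     for i in range(len(array)):
--         c = chr(c_ASCII)
--         if (array[i] == c):
--             return i
--     return -1
--
-- def goClockWise(array,pointer,charIndex,charList):
--     charASCII = ord(charList[charIndex])
--
--     subArray = []
--     for i in range(pointer, len(array)):
--         subArray.append(array[i])
--
--     for i in range(pointer):
--         subArray.append(array[i])
--
--     step = FindIndex(subArray, charASCII)
--     return step
-- ===== SOURCE B (Python) =====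
-- def goClockWise(array, pointer, charIndex, charList):
--     n = len(array)
--     target = chr(ord(charList[charIndex]))
--     for k in range(n):
--         if array[(pointer + k) % n] == target:
--             return k
--     return -1
-- ===== Notes on version B (the rewrite author's own statement) =====
-- stated objective: simpler
-- what changed: Instead of materialising a rotated copy of the list and then searching it with a helper that re-computes chr(ord(...)) per element, B does one pass over k in range(n) comparing array[(pointer+k)%n] to the target chr(ord(charList[charIndex])) hoisted out of the loop.
import Mathlib
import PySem

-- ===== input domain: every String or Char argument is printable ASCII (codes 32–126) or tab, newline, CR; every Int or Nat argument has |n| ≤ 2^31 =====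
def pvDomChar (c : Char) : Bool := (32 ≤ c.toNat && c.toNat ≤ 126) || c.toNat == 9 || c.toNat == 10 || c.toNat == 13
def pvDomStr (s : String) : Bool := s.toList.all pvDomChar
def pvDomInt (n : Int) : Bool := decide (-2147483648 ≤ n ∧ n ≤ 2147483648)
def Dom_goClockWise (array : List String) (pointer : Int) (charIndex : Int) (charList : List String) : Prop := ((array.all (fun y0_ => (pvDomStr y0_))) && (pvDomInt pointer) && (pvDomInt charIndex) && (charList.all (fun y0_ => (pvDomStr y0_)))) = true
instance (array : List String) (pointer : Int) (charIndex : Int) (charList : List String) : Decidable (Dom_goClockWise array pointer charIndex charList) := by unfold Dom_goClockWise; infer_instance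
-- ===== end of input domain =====

-- B replaces A's build-a-rotated-copy-then-search with a single modular-index scan
-- comparing against the hoisted target string; return values only (no mutation in either).

-- ===== PORT A =====
-- FindIndex(array, c_ASCII): linear scan, re-computing chr(c_ASCII) each iteration.
def pvFindLoop (cASCII : Int) : List String → Int → Int
  | [], _ => -1
  | s :: rest, i =>
    -- c = chr(c_ASCII)
    if s == String.ofList [Char.ofNat cASCII.toNat] then i else pvFindLoop cASCII rest (i + 1)

def FindIndexPort (array : List String) (cASCII : Int) : Int :=
  pvFindLoop cASCII array 0

-- ord(charList[charIndex]); ord is defined (Pre_) only on one-char strings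
def pvOrdOfOpt (o : Option String) : Int :=
  match o with
  | some s => match s.toList with
              | [c] => (c.toNat : Int)
              | _ => 0      -- ord raises here: outside Pre_
  | none => 0               -- IndexError: outside Pre_

def goClockWise (array : List String) (pointer : Int) (charIndex : Int) (charList : List String) : Int :=
  let charASCII : Int := pvOrdOfOpt (PySem.List.pyGet? charList charIndex)
  -- subArray built by the two append loops; array[i] with Python indexing
  let sub1 : List String :=
    (PySem.List.pyRange pointer (array.length : Int) 1).foldl
      (fun acc i => acc ++ [(PySem.List.pyGet? array i).getD ""]) []
  let subArray : List String :=
    (PySem.List.pyRange 0 pointer 1).foldl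
      (fun acc i => acc ++ [(PySem.List.pyGet? array i).getD ""]) sub1
  FindIndexPort subArray charASCII

-- ===== PORT B =====
-- single pass: for k in range(n): if array[(pointer+k) % n] == target: return k
def pvAltLoop (array : List String) (pointer : Int) (target : String) : Nat → Int → Int
  | 0, _ => -1
  | fuel + 1, k =>
    if (PySem.List.pyGet? array (PySem.Int.mod (pointer + k) (array.length : Int))).getD "" == target
    then k
    else pvAltLoop array pointer target fuel (k + 1)

def goClockWise_alt (array : List String) (pointer : Int) (charIndex : Int) (charList : List String) : Int :=
  -- target = chr(ord(charList[charIndex])), hoisted out of the loop (pvOrdOfOpt = ord, shared with port A)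
  let target : String := String.ofList [Char.ofNat (pvOrdOfOpt (PySem.List.pyGet? charList charIndex)).toNat]
  pvAltLoop array pointer target array.length 0

-- ===== PRECONDITION & SPEC =====
-- Pre_ excludes exactly the inputs where A raises: charIndex out of range (IndexError),
-- a non-single-character string at that index (ord raises TypeError), and pointer outside
-- [-len(array), len(array)] (the loops then hit an out-of-range array[i]: IndexError).
def Pre_goClockWise (array : List String) (pointer : Int) (charIndex : Int) (charList : List String) : Prop :=
  PySem.Raise.InRange charList.length charIndex ∧
  ((PySem.List.pyGet? charList charIndex).getD "").toList.length = 1 ∧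
  -(array.length : Int) ≤ pointer ∧ pointer ≤ (array.length : Int)

instance (array : List String) (pointer : Int) (charIndex : Int) (charList : List String) : Decidable (Pre_goClockWise array pointer charIndex charList) := by unfold Pre_goClockWise; infer_instance

def pvWitness_goClockWise : List String × Int × Int × List String :=
  (["a", "b", "c"], 2, 0, ["b"])

def Spec_goClockWise (array : List String) (pointer : Int) (charIndex : Int) (charList : List String) (out : Int) : Prop := out = goClockWise_alt array pointer charIndex charList
instance (array : List String) (pointer : Int) (charIndex : Int) (charList : List String) (out : Int) : Decidable (Spec_goClockWise array pointer charIndex charList out) := by unfold Spec_goClockWise; infer_instance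

-- ===== CLAIM (what is proved, stated in full; the proofs are below) =====
def Claim_equal_goClockWise : Prop := ∀ (array : List String) (pointer : Int) (charIndex : Int) (charList : List String), Dom_goClockWise array pointer charIndex charList → Pre_goClockWise array pointer charIndex charList → Spec_goClockWise array pointer charIndex charList (goClockWise array pointer charIndex charList)

-- ===== LEMMAS AND PROOFS =====

-- the append-accumulating foldl is init ++ map
theorem pv_foldl_append_map {α β : Type} (g : α → β) :
    ∀ (l : List α) (init : List β),
      l.foldl (fun acc i => acc ++ [g i]) init = init ++ l.map g := by
  intro l
  induction l with
  | nil => intro init; simp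
  | cons x xs ih => intro init; simp [List.foldl, ih]

-- ranges of nonnegative indices read a contiguous segment of the array
theorem pv_map_seg (array : List String) :
    ∀ (b a : Nat), b ≤ array.length →
      (PySem.List.pyRange (a : Int) (b : Int) 1).map
        (fun i => (PySem.List.pyGet? array i).getD "") = (array.take b).drop a := by
  intro b a hb
  rw [PySem.List.pyRange_one]
  have hba : (((b : Int) - (a : Int)).toNat) = b - a := by omega
  rw [hba, List.map_map]
  apply List.ext_getElem
  · simp; omega
  · intro j hj1 hj2
    have hjlt : j < b - a := by simpa using hj1
    have hlt : a + j < array.length := by omega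
    simp only [List.getElem_map, List.getElem_range, Function.comp_apply]
    have : (a : Int) + (j : Int) = ((a + j : Nat) : Int) := by push_cast; ring
    rw [this, PySem.List.pyGet?_natCast]
    simp [List.getElem_drop, List.getElem_take, hlt]

-- negative indices read the tail of the array
theorem pv_map_negseg (array : List String) :
    ∀ (k : Nat), k ≤ array.length →
      (PySem.List.pyRange (-(k : Int)) 0 1).map
        (fun i => (PySem.List.pyGet? array i).getD "") = array.drop (array.length - k) := by
  intro k hk
  rw [PySem.List.pyRange_one]
  have h0 : ((0 : Int) - (-(k : Int))).toNat = k := by omega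
  rw [h0, List.map_map]
  apply List.ext_getElem
  · simp; omega
  · intro j hj1 hj2
    have hjlt : j < k := by simpa using hj1
    simp only [List.getElem_map, List.getElem_range, Function.comp_apply]
    have : (-(k : Int) + (j : Int)) = -(((k - j : Nat)) : Int) := by omega
    rw [this, PySem.List.pyGet?_neg_natCast array (k - j) (by omega) (by omega)]
    have hlt : array.length - (k - j) < array.length := by omega
    rw [List.getElem?_eq_getElem hlt]
    rw [List.getElem_drop]
    simp only [Option.getD_some]
    congr 1
    omega

-- pvFindLoop on a list with no match
theorem pv_findLoop_all_fail (t : Int) :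
    ∀ (l : List String) (i : Int),
      (∀ s ∈ l, ¬ (s == String.ofList [Char.ofNat t.toNat]) = true) → pvFindLoop t l i = -1 := by
  intro l
  induction l with
  | nil => intro i _; rfl
  | cons x xs ih =>
    intro i h
    have hx := h x (by simp)
    simp only [pvFindLoop, if_neg hx]
    exact ih _ (fun s hs => h s (by simp [hs]))

-- a match in the first part makes the appended part invisible
theorem pv_findLoop_append_of_match (t : Int) :
    ∀ (l1 l2 : List String) (i : Int),
      (∃ s ∈ l1, (s == String.ofList [Char.ofNat t.toNat]) = true) →
      pvFindLoop t (l1 ++ l2) i = pvFindLoop t l1 i := by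
  intro l1
  induction l1 with
  | nil => intro l2 i h; simp at h
  | cons x xs ih =>
    intro l2 i h
    by_cases hx : (x == String.ofList [Char.ofNat t.toNat]) = true
    · simp [pvFindLoop, hx]
    · have : ∃ s ∈ xs, (s == String.ofList [Char.ofNat t.toNat]) = true := by
        rcases h with ⟨s, hs, hmatch⟩
        rcases List.mem_cons.mp hs with h1 | h2
        · exact absurd (h1 ▸ hmatch) hx
        · exact ⟨s, h2, hmatch⟩
      simp only [List.cons_append, pvFindLoop, if_neg hx]
      exact ih l2 (i + 1) this

-- appending elements already present in the first part never changes the result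
theorem pv_findLoop_append (t : Int) (l1 l2 : List String) (i : Int)
    (hsub : ∀ s ∈ l2, s ∈ l1) : pvFindLoop t (l1 ++ l2) i = pvFindLoop t l1 i := by
  by_cases h : ∃ s ∈ l1, (s == String.ofList [Char.ofNat t.toNat]) = true
  · exact pv_findLoop_append_of_match t l1 l2 i h
  · push Not at h
    have hfail1 : ∀ s ∈ l1, ¬ (s == String.ofList [Char.ofNat t.toNat]) = true := by
      intro s hs; exact h s hs
    have hfailall : ∀ s ∈ l1 ++ l2, ¬ (s == String.ofList [Char.ofNat t.toNat]) = true := by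
      intro s hs
      rcases List.mem_append.mp hs with h1 | h2
      · exact hfail1 s h1
      · exact hfail1 s (hsub s h2)
    rw [pv_findLoop_all_fail t _ i hfailall, pv_findLoop_all_fail t _ i hfail1]

-- the B loop scans exactly R.drop k, counting from k
theorem pv_altLoop_eq (array : List String) (p t0 : Int) (R : List String)
    (hlen : R.length = array.length)
    (helem : ∀ k : Nat, (hk : k < array.length) →
      (PySem.List.pyGet? array (PySem.Int.mod (p + (k : Int)) (array.length : Int))).getD ""
        = R[k]'(by omega)) :
    ∀ (fuel k : Nat), k + fuel = array.length →
      pvAltLoop array p (String.ofList [Char.ofNat t0.toNat]) fuel (k : Int)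
        = pvFindLoop t0 (R.drop k) (k : Int) := by
  intro fuel
  induction fuel with
  | zero =>
    intro k hk
    have : R.drop k = [] := by
      apply List.drop_eq_nil_of_le; omega
    simp [pvAltLoop, this, pvFindLoop]
  | succ n ih =>
    intro k hk
    have hklt : k < array.length := by omega
    have hdrop : R.drop k = R[k]'(by omega) :: R.drop (k + 1) := by
      exact List.drop_eq_getElem_cons (by omega)
    rw [hdrop]
    simp only [pvAltLoop, pvFindLoop, helem k hklt]
    by_cases hc : (R[k]'(by omega) == String.ofList [Char.ofNat t0.toNat]) = true
    · simp [hc]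
    · simp only [if_neg hc]
      have : (k : Int) + 1 = ((k + 1 : Nat) : Int) := by push_cast; ring
      rw [this, ih (k + 1) (by omega)]

-- ===== VERDICT (by name: the statement is the Claim_ definition above) =====
-- the modular access of B reads element k of R = drop m ++ take m, m = pointer mod n
theorem pv_helem (array : List String) (pointer : Int) (hn : 0 < array.length)
    (_hp1 : -(array.length : Int) ≤ pointer) (_hp2 : pointer ≤ (array.length : Int)) :
    ∀ (k : Nat), (hk : k < array.length) →
      (PySem.List.pyGet? array (PySem.Int.mod (pointer + (k : Int)) (array.length : Int))).getD ""
        = ((array.drop (PySem.Int.mod pointer (array.length : Int)).toNat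
            ++ array.take (PySem.Int.mod pointer (array.length : Int)).toNat)[k]'(by
              simp only [List.length_append, List.length_drop, List.length_take]; omega)) := by
  intro k hk
  set n : Nat := array.length with hn'
  have hnpos : (0 : Int) < (n : Int) := by exact_mod_cast hn
  set m : Nat := (PySem.Int.mod pointer (n : Int)).toNat with hm
  have hmod0 : 0 ≤ PySem.Int.mod pointer (n : Int) := PySem.Int.mod_nonneg pointer hnpos
  have hmodlt : PySem.Int.mod pointer (n : Int) < (n : Int) := PySem.Int.mod_lt pointer hnpos
  have hmlt : m < n := by omega
  have hpm : pointer % (n : Int) = (m : Int) := by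
    rw [PySem.Int.mod_eq_emod_of_pos hnpos] at hm hmod0 hmodlt
    omega
  have hq : pointer + (k : Int) = ((m : Int) + (k : Int)) + (n : Int) * (pointer / (n : Int)) := by
    have h := Int.emod_add_mul_ediv pointer (n : Int)
    omega
  have hmod : PySem.Int.mod (pointer + (k : Int)) (n : Int) = (((m + k) % n : Nat) : Int) := by
    rw [PySem.Int.mod_eq_emod_of_pos hnpos, hq, Int.add_mul_emod_self_left]
    push_cast
    rfl
  rw [hmod, PySem.List.pyGet?_natCast,
      List.getElem?_eq_getElem (Nat.mod_lt _ (by omega)), Option.getD_some]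
  by_cases hcase : k < n - m
  · have h1 : k < (array.drop m).length := by simp [List.length_drop]; omega
    rw [List.getElem_append_left h1, List.getElem_drop]
    congr 1
    rw [Nat.mod_eq_of_lt (by omega)]
  · have h1 : (array.drop m).length ≤ k := by simp [List.length_drop]; omega
    rw [List.getElem_append_right h1]
    rw [List.getElem_take]
    have hmk : (m + k) % n = m + k - n := by
      rw [Nat.mod_eq_sub_mod (by omega), Nat.mod_eq_of_lt (by omega)]
    congr 1
    simp only [List.length_drop]
    rw [hn'] at hmk
    omega

-- ===== VERDICT (by name: the statement is the Claim_ definition above) =====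
theorem goClockWise_spec : Claim_equal_goClockWise := by
  intro array pointer charIndex charList _hdom hpre
  obtain ⟨hIR, hone, hp1, hp2⟩ := hpre
  -- the indexed element of charList is a one-character string s = [c]
  obtain ⟨s, hs⟩ : ∃ s, PySem.List.pyGet? charList charIndex = some s := by
    cases hget : PySem.List.pyGet? charList charIndex with
    | none => exact absurd hIR ((PySem.List.pyGet?_eq_none_iff charList charIndex).mp hget)
    | some s => exact ⟨s, rfl⟩
  rw [hs] at hone
  simp only [Option.getD_some] at hone
  obtain ⟨c, hsl⟩ : ∃ c, s.toList = [c] := List.length_eq_one_iff.mp hone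
  -- unfold both ports
  unfold Spec_goClockWise goClockWise goClockWise_alt FindIndexPort
  have hOrd : pvOrdOfOpt (PySem.List.pyGet? charList charIndex) = (c.toNat : Int) := by
    rw [hs]; simp [pvOrdOfOpt, hsl]
  simp only [hOrd]
  rw [pv_foldl_append_map, pv_foldl_append_map, List.nil_append]
  set t0 : Int := (c.toNat : Int) with ht0
  set g : Int → String := fun i => (PySem.List.pyGet? array i).getD "" with hg
  set n : Nat := array.length with hn'
  by_cases hn : 0 < n
  case neg =>
    -- empty array: both scans are empty
    have hn0 : n = 0 := by omega
    have hp0 : pointer = 0 := by rw [hn'] at hp1 hp2; omega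
    have harr : array = [] := List.length_eq_zero_iff.mp hn0
    subst hp0
    simp [harr, pvAltLoop, pvFindLoop, hn']
  case pos =>
    have hnpos : (0 : Int) < (n : Int) := by exact_mod_cast hn
    set m : Nat := (PySem.Int.mod pointer (n : Int)).toNat with hm
    set R : List String := array.drop m ++ array.take m with hR
    have hmod0 : 0 ≤ PySem.Int.mod pointer (n : Int) := PySem.Int.mod_nonneg pointer hnpos
    have hmodlt : PySem.Int.mod pointer (n : Int) < (n : Int) := PySem.Int.mod_lt pointer hnpos
    have hmlt : m < n := by omega
    have hRlen : R.length = array.length := by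
      simp only [hR, List.length_append, List.length_drop, List.length_take, ← hn']; omega
    -- the B side is a scan of R
    have hB : pvAltLoop array pointer (String.ofList [Char.ofNat t0.toNat]) n 0
        = pvFindLoop t0 R 0 := by
      have := pv_altLoop_eq array pointer t0 R hRlen
        (fun k hk => (pv_helem array pointer hn hp1 hp2 k hk).symm ▸ rfl) n 0 (by omega)
      simpa using this
    rw [hB]
    -- the A side: subArray = R (0 ≤ pointer) or R ++ array.drop m (pointer < 0)
    by_cases hpneg : pointer < 0
    · -- pointer < 0 : subArray = array.drop m ++ array  =  R ++ array.drop m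
      have hk0 : pointer = -(((-pointer).toNat : Nat) : Int) := by omega
      set k0 : Nat := (-pointer).toNat with hk0'
      have hk0n : k0 ≤ n := by rw [hn'] at hp1; omega
      have hsplit : PySem.List.pyRange pointer (n : Int) 1
          = PySem.List.pyRange pointer 0 1 ++ PySem.List.pyRange 0 (n : Int) 1 :=
        PySem.List.pyRange_one_append pointer 0 (n : Int) (by omega) (by omega)
      have hneg : (PySem.List.pyRange pointer 0 1).map g = array.drop (n - k0) := by
        rw [hk0]
        exact pv_map_negseg array k0 (by omega)
      have hpos' : (PySem.List.pyRange 0 (n : Int) 1).map g = array := by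
        have := pv_map_seg array n 0 (by omega)
        simpa [hn'] using this
      have hempty : (PySem.List.pyRange 0 pointer 1).map g = [] := by
        rw [PySem.List.pyRange_one]
        simp
        omega
      have hmval : m = n - k0 := by
        have : pointer % (n : Int) = pointer + (n : Int) := by
          have h1 : (0:Int) ≤ pointer + (n : Int) := by rw [hn'] at hp1; omega
          have h2 : pointer + (n : Int) < (n : Int) := by omega
          have h3 : (pointer + (n : Int) * 1) % (n : Int) = pointer % (n : Int) :=
            Int.add_mul_emod_self_left pointer (n : Int) 1
          have h4 : pointer + (n : Int) * 1 = pointer + (n : Int) := by ring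
          rw [h4, Int.emod_eq_of_lt h1 h2] at h3
          exact h3.symm
        rw [PySem.Int.mod_eq_emod_of_pos hnpos] at hm
        omega
      rw [hsplit, List.map_append, hneg, hpos', hempty, List.append_nil, ← hmval]
      have hassoc : array.drop m ++ array = R ++ array.drop m := by
        rw [hR, List.append_assoc, List.take_append_drop]
      rw [hassoc]
      exact pv_findLoop_append t0 R (array.drop m) 0
        (fun x hx => List.mem_append.mpr (Or.inl hx))
    · -- 0 ≤ pointer ≤ n : subArray = drop p0 ++ take p0 = R
      have hp0cast : pointer = ((pointer.toNat : Nat) : Int) := by omega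
      set p0 : Nat := pointer.toNat with hp0'
      have hp0n : p0 ≤ n := by rw [hn'] at hp2; omega
      have h1 : (PySem.List.pyRange pointer (n : Int) 1).map g = array.drop p0 := by
        rw [hp0cast, hn']
        rw [pv_map_seg array array.length p0 (le_refl _)]
        simp
      have h2 : (PySem.List.pyRange 0 pointer 1).map g = array.take p0 := by
        rw [hp0cast]
        rw [show ((p0 : Nat) : Int) = ((p0 : Nat) : Int) from rfl]
        have := pv_map_seg array p0 0 (by omega)
        simpa using this
      rw [h1, h2]
      have hsub : array.drop p0 ++ array.take p0 = R := by
        by_cases hlt : p0 < n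
        · have : m = p0 := by
            have : pointer % (n : Int) = pointer := by
              apply Int.emod_eq_of_lt (by omega)
              rw [hn'] at hp2; omega
            rw [PySem.Int.mod_eq_emod_of_pos hnpos] at hm
            omega
          rw [hR, this]
        · have hpn : p0 = n := by omega
          have hm0 : m = 0 := by
            have : pointer % (n : Int) = 0 := by
              have : pointer = (n : Int) := by omega
              simp [this]
            rw [PySem.Int.mod_eq_emod_of_pos hnpos] at hm
            omega
          rw [hR, hm0, hpn, hn']
          simp
      rw [hsub]
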